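-- pv_equiv track=rewrite | github.com/dbwlgns15/ALGORITHM | PROGRAMMERS/Lv2/Lv2_더맵게.py | solution
-- ===== SOURCE A (Python) =====
-- import heapq
--
-- def solution(scoville, K):
--     heapq.heapify(scoville)
--     m1 = heapq.heappop(scoville)
--     answer = 0
--     while m1 < K:
--         if len(scoville) == 0:
--             return -1
--         m2 = heapq.heappop(scoville)
--         heapq.heappush(scoville,m1+(m2*2))
--         m1 = heapq.heappop(scoville)
--         answer += 1
--     return answer
-- ===== SOURCE B (Python) =====
-- def solution(scoville, K):
--     # Two-queue merge: sort once; every mixed value is appended to a second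
--     # queue `merged`, which provably stays nondecreasing (each new mix
--     # m1 + 2*m2 is <= 3*x for every remaining element x), so the global
--     # minimum is always the smaller of the two queue heads.  No heap and no
--     # reinsertion into a sorted structure; queues are consumed by index.
--     base = sorted(scoville)
--     merged = []
--     i = j = 0
--     answer = 0
--     while True:
--         # pop the global minimum m1 (IndexError on empty input, like A)
--         if j < len(merged) and (i >= len(base) or merged[j] <= base[i]):
--             m1 = merged[j]; j += 1
--         else:
--             m1 = base[i]; i += 1
--         if m1 >= K:
--             return answer
--         if i >= len(base) and j >= len(merged):
--             return -1
--         # pop the second minimum m2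
--         if j < len(merged) and (i >= len(base) or merged[j] <= base[i]):
--             m2 = merged[j]; j += 1
--         else:
--             m2 = base[i]; i += 1
--         merged.append(m1 + m2 * 2)
--         answer += 1
-- ===== Notes on version B (the rewrite author's own statement) =====
-- stated objective: faster
-- what changed: B replaces the priority queue entirely by a two-queue merge: it sorts once, appends every mix to a second FIFO queue that provably stays nondecreasing, and takes each minimum as the smaller of the two queue heads with O(1) steps per pop instead of heap sift operations.
import Mathlib
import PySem

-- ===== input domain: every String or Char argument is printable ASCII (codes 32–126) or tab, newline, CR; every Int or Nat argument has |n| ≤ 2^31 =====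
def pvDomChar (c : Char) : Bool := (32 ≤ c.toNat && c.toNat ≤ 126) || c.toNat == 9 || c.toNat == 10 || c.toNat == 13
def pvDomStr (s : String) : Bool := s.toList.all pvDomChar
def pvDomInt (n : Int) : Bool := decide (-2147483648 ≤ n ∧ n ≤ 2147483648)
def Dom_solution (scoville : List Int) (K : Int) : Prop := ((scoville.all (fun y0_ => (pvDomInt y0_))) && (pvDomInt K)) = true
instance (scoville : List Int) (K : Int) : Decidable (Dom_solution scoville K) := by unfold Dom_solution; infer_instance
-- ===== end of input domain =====

-- B replaces A's heap by a two-queue merge: one initial sort, every mix appended to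
-- a second queue that stays nondecreasing, each pop = smaller of the two queue heads.
-- A mutates its argument in place (heapify/pop); B reads a sorted copy — the
-- equivalence proved here is about the RETURN value only.

-- ===== PORT A =====
-- heapq.heappop, ported by its library contract: returns the (first) minimum and the
-- list with that occurrence removed; none exactly where Python raises IndexError ([]).
def heapPopA (l : List Int) : Option (Int × List Int) :=
  match PySem.List.min? l (fun x => x) with
  | none => none
  | some m => some (m, l.erase m)

theorem heapPopA_length {l : List Int} {m : Int} {r : List Int}
    (h : heapPopA l = some (m, r)) : r.length + 1 = l.length := by
  unfold heapPopA at h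
  cases hm : PySem.List.min? l (fun x => x) with
  | none => simp [hm] at h
  | some m' =>
    rw [hm] at h
    simp only [Option.some.injEq, Prod.mk.injEq] at h
    obtain ⟨rfl, rfl⟩ := h
    have hmem := PySem.List.min?_mem hm
    have := List.length_erase_of_mem hmem
    have : 0 < l.length := List.length_pos_of_mem hmem
    omega

-- A's while-loop: state is the popped minimum m1, the remaining heap, and answer.
def loopA (m1 : Int) (rest : List Int) (K ans : Int) : Int :=
  if m1 < K then
    if rest.length = 0 then -1
    else
      match h2 : heapPopA rest with
      | none => -1  -- unreachable: rest ≠ []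
      | some (m2, r) =>
        -- heapq.heappush by its contract: the heap holds r plus the new element
        match h3 : heapPopA (r ++ [m1 + m2 * 2]) with
        | none => -1  -- unreachable: the pushed list is nonempty
        | some (m1', r2) => loopA m1' r2 K (ans + 1)
  else ans
termination_by rest.length
decreasing_by
  have h2' := heapPopA_length h2
  have h3' := heapPopA_length h3
  simp at h3'
  omega

def solution (scoville : List Int) (K : Int) : Int :=
  match heapPopA scoville with
  | none => 0  -- Python raises IndexError here; excluded by Pre_solution
  | some (m1, rest) => loopA m1 rest K 0

-- ===== PORT B =====
-- Source B consumes its two queues by advancing the indices i and j; a queue suffix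
-- base[i:] / merged[j:] is ported as a list consumed from the head.  popMinB is
-- Source B's duplicated pop-the-smaller-head step, i.e. the branch
-- 'if j < len(merged) and (i >= len(base) or merged[j] <= base[i])'.
def popMinB (bs ms : List Int) : Option (Int × List Int × List Int) :=
  match ms, bs with
  | m :: mt, [] => some (m, [], mt)
  | m :: mt, b :: bt => if m ≤ b then some (m, b :: bt, mt) else some (b, bt, m :: mt)
  | [], b :: bt => some (b, bt, [])
  | [], [] => none

theorem popMinB_length {bs ms : List Int} {m : Int} {bs' ms' : List Int}
    (h : popMinB bs ms = some (m, bs', ms')) :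
    bs'.length + ms'.length + 1 = bs.length + ms.length := by
  unfold popMinB at h
  cases ms with
  | nil =>
    cases bs with
    | nil => simp at h
    | cons b bt => simp_all
  | cons m0 mt =>
    cases bs with
    | nil => simp_all
    | cons b bt =>
      by_cases hle : m0 ≤ b <;> simp_all <;> omega

-- Source B's 'while True' loop; the state is the two queue suffixes and answer.
def loopB (bs ms : List Int) (K ans : Int) : Int :=
  match h1 : popMinB bs ms with
  | none => 0  -- Python raises IndexError here (empty input); excluded by Pre_solution
  | some (m1, bs1, ms1) =>
    if m1 < K then  -- python: 'if m1 >= K: return answer', then continue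
      if bs1 = [] ∧ ms1 = [] then -1
      else
        match h2 : popMinB bs1 ms1 with
        | none => -1  -- unreachable: the queues are not both empty
        | some (m2, bs2, ms2) => loopB bs2 (ms2 ++ [m1 + m2 * 2]) K (ans + 1)
    else ans
termination_by bs.length + ms.length
decreasing_by
  have e1 := popMinB_length h1
  have e2 := popMinB_length h2
  simp only [List.length_append, List.length_cons, List.length_nil]
  omega

def solution_alt (scoville : List Int) (K : Int) : Int :=
  loopB (PySem.List.sorted scoville (fun x => x)) [] K 0

-- ===== PRECONDITION & SPEC =====
-- Pre_ excludes only the empty list, on which A (and B) raise IndexError.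
def Pre_solution (scoville : List Int) (K : Int) : Prop := scoville ≠ []
instance (scoville : List Int) (K : Int) : Decidable (Pre_solution scoville K) := by unfold Pre_solution; infer_instance
def pvWitness_solution : List Int × Int := ([1, 2, 3, 9, 10, 12], 7)

def Spec_solution (scoville : List Int) (K : Int) (out : Int) : Prop := out = solution_alt scoville K
instance (scoville : List Int) (K : Int) (out : Int) : Decidable (Spec_solution scoville K out) := by unfold Spec_solution; infer_instance

-- ===== CLAIM (what is proved, stated in full; the proofs are below) =====
def Claim_equal_solution : Prop := ∀ (scoville : List Int) (K : Int), Dom_solution scoville K → Pre_solution scoville K → Spec_solution scoville K (solution scoville K)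

-- ===== LEMMAS AND PROOFS =====

-- A's whole computation on a pool, as a function of the pool.
def poolRunA (pool : List Int) (K ans : Int) : Int :=
  match heapPopA pool with
  | none => 0
  | some (m1, rest) => loopA m1 rest K ans

theorem heapPopA_eq_some {l : List Int} {m : Int} {r : List Int}
    (h : heapPopA l = some (m, r)) :
    PySem.List.min? l (fun x => x) = some m ∧ r = l.erase m := by
  unfold heapPopA at h
  cases hmin : PySem.List.min? l (fun x => x) with
  | none => rw [hmin] at h; simp at h
  | some m' =>
    rw [hmin] at h
    simp only [Option.some.injEq, Prod.mk.injEq] at h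
    obtain ⟨h1, h2⟩ := h
    subst h1; subst h2
    exact ⟨rfl, rfl⟩

theorem heapPopA_isSome {l : List Int} (h : l ≠ []) : ∃ m r, heapPopA l = some (m, r) := by
  unfold heapPopA
  cases hmin : PySem.List.min? l (fun x => x) with
  | none => exact absurd ((PySem.List.min?_eq_none_iff l _).mp hmin) h
  | some m => exact ⟨m, l.erase m, rfl⟩

theorem heapPopA_eq_none {l : List Int} (h : heapPopA l = none) : l = [] := by
  unfold heapPopA at h
  cases hmin : PySem.List.min? l (fun x => x) with
  | none => exact (PySem.List.min?_eq_none_iff l _).mp hmin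
  | some m => rw [hmin] at h; simp at h

-- on perm-equal pools the popped values agree and the rests are perm-equal.
theorem heapPopA_perm {l l' : List Int} (hp : l.Perm l')
    {m : Int} {r : List Int} {m' : Int} {r' : List Int}
    (h : heapPopA l = some (m, r)) (h' : heapPopA l' = some (m', r')) :
    m = m' ∧ r.Perm r' := by
  obtain ⟨hmin, hr⟩ := heapPopA_eq_some h
  obtain ⟨hmin', hr'⟩ := heapPopA_eq_some h'
  have hm := PySem.List.min?_mem hmin
  have hlo := PySem.List.min?_isMin hmin
  have hm' := PySem.List.min?_mem hmin'
  have hlo' := PySem.List.min?_isMin hmin'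
  have hmm : m = m' :=
    le_antisymm (hlo m' (hp.mem_iff.mpr hm')) (hlo' m (hp.mem_iff.mp hm))
  subst hmm
  exact ⟨rfl, by rw [hr, hr']; exact hp.erase m⟩

theorem loopA_step_stop {m1 : Int} {rest : List Int} {K ans : Int} (h : ¬ m1 < K) :
    loopA m1 rest K ans = ans := by
  rw [loopA, if_neg h]

theorem loopA_step_empty {m1 : Int} {rest : List Int} {K ans : Int}
    (hK : m1 < K) (h0 : rest.length = 0) : loopA m1 rest K ans = -1 := by
  rw [loopA, if_pos hK, if_pos h0]

theorem loopA_step_go {m1 m2 m1' : Int} {rest r r2 : List Int} {K ans : Int}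
    (hK : m1 < K) (h2 : heapPopA rest = some (m2, r))
    (h3 : heapPopA (r ++ [m1 + m2 * 2]) = some (m1', r2)) :
    loopA m1 rest K ans = loopA m1' r2 K (ans + 1) := by
  have hlen := heapPopA_length h2
  rw [loopA, if_pos hK, if_neg (by omega)]
  split
  · next h2' => rw [h2'] at h2; simp at h2
  · next m2' r' h2' =>
    rw [h2'] at h2
    simp only [Option.some.injEq, Prod.mk.injEq] at h2
    obtain ⟨rfl, rfl⟩ := h2
    split
    · next h3' => rw [h3'] at h3; simp at h3
    · next m1'' r2' h3' =>
      rw [h3'] at h3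
      simp only [Option.some.injEq, Prod.mk.injEq] at h3
      obtain ⟨rfl, rfl⟩ := h3
      rfl

theorem loopA_perm : ∀ (n : Nat) (rest rest' : List Int) (m1 K ans : Int),
    rest.length = n → rest.Perm rest' → loopA m1 rest K ans = loopA m1 rest' K ans := by
  intro n
  induction n using Nat.strong_induction_on with
  | _ n ih =>
    intro rest rest' m1 K ans hn hp
    by_cases hK : m1 < K
    · have hlen := hp.length_eq
      by_cases h0 : rest.length = 0
      · rw [loopA_step_empty hK h0, loopA_step_empty hK (by omega)]
      · have hne : rest ≠ [] := fun h => h0 (by simp [h])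
        have hne' : rest' ≠ [] := fun h => (show ¬ rest'.length = 0 by omega) (by simp [h])
        obtain ⟨m2, r, h2⟩ := heapPopA_isSome hne
        obtain ⟨m2', r', h2'⟩ := heapPopA_isSome hne'
        obtain ⟨hm2, hrr⟩ := heapPopA_perm hp h2 h2'
        subst hm2
        obtain ⟨m3, r3, h3⟩ := heapPopA_isSome (l := r ++ [m1 + m2 * 2]) (by simp)
        obtain ⟨m3', r3', h3'⟩ := heapPopA_isSome (l := r' ++ [m1 + m2 * 2]) (by simp)
        obtain ⟨hm3, hr3⟩ := heapPopA_perm (hrr.append_right [m1 + m2 * 2]) h3 h3'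
        subst hm3
        rw [loopA_step_go hK h2 h3, loopA_step_go hK h2' h3']
        have e2 := heapPopA_length h2
        have e3 := heapPopA_length h3
        simp only [List.length_append, List.length_cons, List.length_nil] at e3
        exact ih r3.length (by omega) r3 r3' m3 K (ans + 1) rfl hr3
    · rw [loopA_step_stop hK, loopA_step_stop hK]

theorem poolRunA_some {pool : List Int} {m : Int} {rest : List Int} {K ans : Int}
    (h : heapPopA pool = some (m, rest)) : poolRunA pool K ans = loopA m rest K ans := by
  unfold poolRunA
  split
  · next h' => rw [h'] at h; simp at h
  · next m' rest' h' =>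
    rw [h'] at h
    simp only [Option.some.injEq, Prod.mk.injEq] at h
    obtain ⟨rfl, rfl⟩ := h
    rfl

theorem poolRunA_perm {pool pool' : List Int} (hp : pool.Perm pool') (K ans : Int) :
    poolRunA pool K ans = poolRunA pool' K ans := by
  cases h : heapPopA pool with
  | none =>
    have h0 := heapPopA_eq_none h
    subst h0
    have h0' : pool' = [] := hp.symm.eq_nil
    subst h0'
    rfl
  | some p =>
    obtain ⟨m, r⟩ := p
    have hne' : pool' ≠ [] := by
      intro hnil
      subst hnil
      have h0 : pool = [] := hp.eq_nil
      subst h0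
      have := heapPopA_length h
      simp at this
    obtain ⟨m', r', h'⟩ := heapPopA_isSome hne'
    obtain ⟨hm, hr⟩ := heapPopA_perm hp h h'
    subst hm
    rw [poolRunA_some h, poolRunA_some h']
    exact loopA_perm r.length r r' m K ans rfl hr

theorem sorted_head_le {x : Int} {t : List Int} (h : (x :: t).Pairwise (· ≤ ·)) :
    ∀ y ∈ x :: t, x ≤ y := by
  intro y hy
  rcases List.mem_cons.mp hy with rfl | hy'
  · exact le_refl y
  · exact (List.pairwise_cons.mp h).1 y hy'

theorem mem_le_getLast? : ∀ (l : List Int), l.Pairwise (· ≤ ·) →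
    ∀ {x c : Int}, x ∈ l → l.getLast? = some c → x ≤ c := by
  intro l
  induction l with
  | nil => intro _ x c hx; exact absurd hx (List.not_mem_nil)
  | cons a t ih =>
    intro hs x c hx hc
    cases t with
    | nil =>
      simp at hc hx
      omega
    | cons b t' =>
      rw [List.getLast?_cons_cons] at hc
      have hs' := (List.pairwise_cons.mp hs).2
      rcases List.mem_cons.mp hx with rfl | hx'
      · have hb : b ≤ c := ih hs' (List.mem_cons_self) hc
        have : x ≤ b := (List.pairwise_cons.mp hs).1 b (List.mem_cons_self)
        omega
      · exact ih hs' hx' hc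

theorem popMinB_none {bs ms : List Int} (h : popMinB bs ms = none) : bs = [] ∧ ms = [] := by
  unfold popMinB at h
  cases ms with
  | nil => cases bs with
    | nil => exact ⟨rfl, rfl⟩
    | cons b bt => simp at h
  | cons m0 mt => cases bs with
    | nil => simp at h
    | cons b bt => by_cases hle : m0 ≤ b <;> simp_all

theorem popMinB_spec {bs ms : List Int} {m : Int} {bs' ms' : List Int}
    (hbs : bs.Pairwise (· ≤ ·)) (hms : ms.Pairwise (· ≤ ·))
    (h : popMinB bs ms = some (m, bs', ms')) :
    (m :: (bs' ++ ms')).Perm (bs ++ ms) ∧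
    (∀ x ∈ bs ++ ms, m ≤ x) ∧
    bs'.Pairwise (· ≤ ·) ∧ ms'.Pairwise (· ≤ ·) ∧
    (m ∈ bs ∧ ms' = ms ∨ ms = m :: ms' ∧ bs' = bs) := by
  cases ms with
  | nil =>
    cases bs with
    | nil => simp [popMinB] at h
    | cons b bt =>
      simp only [popMinB, Option.some.injEq, Prod.mk.injEq] at h
      obtain ⟨rfl, rfl, rfl⟩ := h
      refine ⟨by simp, ?_, (List.pairwise_cons.mp hbs).2, List.Pairwise.nil, Or.inl ⟨List.mem_cons_self, rfl⟩⟩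
      intro x hx
      simp only [List.append_nil] at hx
      exact sorted_head_le hbs x hx
  | cons m0 mt =>
    cases bs with
    | nil =>
      simp only [popMinB, Option.some.injEq, Prod.mk.injEq] at h
      obtain ⟨rfl, rfl, rfl⟩ := h
      refine ⟨by simp, ?_, List.Pairwise.nil, (List.pairwise_cons.mp hms).2, Or.inr ⟨rfl, rfl⟩⟩
      intro x hx
      simp only [List.nil_append] at hx
      exact sorted_head_le hms x hx
    | cons b bt =>
      simp only [popMinB] at h
      by_cases hle : m0 ≤ b
      · rw [if_pos hle] at h
        simp only [Option.some.injEq, Prod.mk.injEq] at h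
        obtain ⟨rfl, rfl, rfl⟩ := h
        refine ⟨List.perm_middle.symm, ?_, hbs, (List.pairwise_cons.mp hms).2, Or.inr ⟨rfl, rfl⟩⟩
        intro x hx
        rcases List.mem_append.mp hx with hx' | hx'
        · exact le_trans hle (sorted_head_le hbs x hx')
        · exact sorted_head_le hms x hx'
      · rw [if_neg hle] at h
        simp only [Option.some.injEq, Prod.mk.injEq] at h
        obtain ⟨rfl, rfl, rfl⟩ := h
        refine ⟨by simp, ?_, (List.pairwise_cons.mp hbs).2, hms, Or.inl ⟨List.mem_cons_self, rfl⟩⟩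
        intro x hx
        rcases List.mem_append.mp hx with hx' | hx'
        · exact sorted_head_le hbs x hx'
        · exact le_trans (by omega) (sorted_head_le hms x hx')

-- Main loop equivalence.  Invariant: both queues are sorted; the pool (bs ++ ms)
-- is what A's heap holds; and the last merged value is ≤ 3·x for every other
-- pool element — this is what keeps the merged queue nondecreasing.
theorem loopB_eq : ∀ (n : Nat) (bs ms : List Int) (K ans : Int),
    bs.length + ms.length = n →
    bs.Pairwise (· ≤ ·) → ms.Pairwise (· ≤ ·) →
    (∀ c, ms.getLast? = some c → ∀ x ∈ bs ++ ms.dropLast, c ≤ 3 * x) →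
    loopB bs ms K ans = poolRunA (bs ++ ms) K ans := by
  intro n
  induction n using Nat.strong_induction_on with
  | _ n ih =>
    intro bs ms K ans hn hbs hms hJ
    rw [loopB]
    split
    · next h1 =>
      obtain ⟨rfl, rfl⟩ := popMinB_none h1
      rfl
    · next m1 bs1 ms1 h1 =>
      obtain ⟨hperm1, hmin1, hbs1, hms1, hdisj1⟩ := popMinB_spec hbs hms h1
      have hpoolne : bs ++ ms ≠ [] := by
        intro hp0
        have := hperm1.length_eq
        simp [hp0] at this
      obtain ⟨mA, restA, hA⟩ := heapPopA_isSome hpoolne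
      have hm1pool : m1 ∈ bs ++ ms := hperm1.mem_iff.mp List.mem_cons_self
      have hmA : mA = m1 := by
        obtain ⟨hminA, _⟩ := heapPopA_eq_some hA
        have hmemA := PySem.List.min?_mem hminA
        have hloA := PySem.List.min?_isMin hminA
        exact le_antisymm (hloA m1 hm1pool) (hmin1 mA hmemA)
      subst hmA
      have hrest : restA.Perm (bs1 ++ ms1) := by
        obtain ⟨_, hrA⟩ := heapPopA_eq_some hA
        have hp := (List.cons_perm_iff_perm_erase.mp hperm1).2
        rw [hrA]
        exact hp.symm
      rw [poolRunA_some hA]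
      by_cases hK : mA < K
      · rw [if_pos hK]
        by_cases hemp : bs1 = [] ∧ ms1 = []
        · rw [if_pos hemp]
          have hlen0 : restA.length = 0 := by
            have := hrest.length_eq
            simp [hemp.1, hemp.2] at this
            simp [this]
          rw [loopA_step_empty hK hlen0]
        · rw [if_neg hemp]
          have hrestne : restA ≠ [] := by
            intro h0
            apply hemp
            have hl := hrest.length_eq
            rw [h0] at hl
            simp only [List.length_nil, List.length_append] at hl
            exact ⟨List.eq_nil_of_length_eq_zero (by omega), List.eq_nil_of_length_eq_zero (by omega)⟩
          split
          · next hB2 => exact absurd (popMinB_none hB2) hemp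
          · next m2B bs2 ms2 hB2 =>
            obtain ⟨hperm2, hmin2, hbs2, hms2, hdisj2⟩ := popMinB_spec hbs1 hms1 hB2
            obtain ⟨m2A, rA, hA2⟩ := heapPopA_isSome hrestne
            have hm2pool1 : m2B ∈ bs1 ++ ms1 := hperm2.mem_iff.mp List.mem_cons_self
            have hm2A : m2A = m2B := by
              obtain ⟨hminA2, _⟩ := heapPopA_eq_some hA2
              have hmemA2 := PySem.List.min?_mem hminA2
              have hloA2 := PySem.List.min?_isMin hminA2
              exact le_antisymm (hloA2 m2B (hrest.mem_iff.mpr hm2pool1))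
                (hmin2 m2A (hrest.mem_iff.mp hmemA2))
            subst hm2A
            have hrA : rA.Perm (bs2 ++ ms2) := by
              obtain ⟨_, hrA'⟩ := heapPopA_eq_some hA2
              have h' : (bs2 ++ ms2).Perm (restA.erase m2A) :=
                (List.cons_perm_iff_perm_erase.mp (hperm2.trans hrest.symm)).2
              rw [hrA']
              exact h'.symm
            -- m1 ≤ m2
            have hm1m2 : mA ≤ m2A := by
              apply hmin1
              exact (hperm1.mem_iff).mp (List.mem_cons_of_mem _ hm2pool1)
            -- value membership chains ms2 ⊆ ms1 ⊆ ms
            have hms2sub : ∀ x ∈ ms2, x ∈ ms1 := by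
              intro x hx
              rcases hdisj2 with ⟨_, rfl⟩ | ⟨hms1eq, _⟩
              · exact hx
              · rw [hms1eq]; exact List.mem_cons_of_mem _ hx
            have hms1sub : ∀ x ∈ ms1, x ∈ ms := by
              intro x hx
              rcases hdisj1 with ⟨_, rfl⟩ | ⟨hmseq, _⟩
              · exact hx
              · rw [hmseq]; exact List.mem_cons_of_mem _ hx
            -- every element of ms2 is ≤ the mixed value c = m1 + m2*2
            have hle_c : ∀ x ∈ ms2, x ≤ mA + m2A * 2 := by
              intro x hx
              have hxms : x ∈ ms := hms1sub x (hms2sub x hx)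
              have hmsne : ms ≠ [] := by
                intro h0; rw [h0] at hxms; exact absurd hxms List.not_mem_nil
              obtain ⟨c0, hc0⟩ : ∃ c0, ms.getLast? = some c0 := by
                cases hms' : ms.getLast? with
                | none => exact absurd (List.getLast?_eq_none_iff.mp hms') hmsne
                | some c0 => exact ⟨c0, rfl⟩
              have hxc0 : x ≤ c0 := mem_le_getLast? ms hms hxms hc0
              have hc03 : c0 ≤ 3 * mA := by
                apply hJ c0 hc0
                rcases hdisj1 with ⟨hm1bs, _⟩ | ⟨hmseq, _⟩
                · exact List.mem_append.mpr (Or.inl hm1bs)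
                · have hxms1 : x ∈ ms1 := hms2sub x hx
                  have hms1ne : ms1 ≠ [] := by
                    intro h0; rw [h0] at hxms1; exact absurd hxms1 List.not_mem_nil
                  obtain ⟨a, t, rfl⟩ : ∃ a t, ms1 = a :: t := by
                    cases ms1 with
                    | nil => exact absurd rfl hms1ne
                    | cons a t => exact ⟨a, t, rfl⟩
                  rw [hmseq]
                  simp
              omega
            -- hypotheses of the recursive call
            have hlen2 : bs2.length + (ms2 ++ [mA + m2A * 2]).length < n := by
              have e1 := popMinB_length h1
              have e2 := popMinB_length hB2
              simp only [List.length_append, List.length_cons, List.length_nil]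
              omega
            have hsorted2 : (ms2 ++ [mA + m2A * 2]).Pairwise (· ≤ ·) := by
              rw [List.pairwise_append]
              refine ⟨hms2, List.pairwise_singleton _ _, ?_⟩
              intro x hx y hy
              rw [List.mem_singleton] at hy
              subst hy
              exact hle_c x hx
            have hJ2 : ∀ c, (ms2 ++ [mA + m2A * 2]).getLast? = some c →
                ∀ x ∈ bs2 ++ (ms2 ++ [mA + m2A * 2]).dropLast, c ≤ 3 * x := by
              intro c hc x hx
              rw [List.getLast?_concat] at hc
              have hc' : c = mA + m2A * 2 := by injection hc; omega
              subst hc'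
              rw [List.dropLast_concat] at hx
              have hxpool : x ∈ bs1 ++ ms1 :=
                hperm2.mem_iff.mp (List.mem_cons_of_mem _ hx)
              have := hmin2 x hxpool
              omega
            rw [ih _ hlen2 bs2 (ms2 ++ [mA + m2A * 2]) K (ans + 1) rfl hbs2 hsorted2 hJ2]
            -- A side: one step of loopA, then both are poolRunA of perm-equal pools
            obtain ⟨m3, r3, hA3⟩ := heapPopA_isSome (l := rA ++ [mA + m2A * 2]) (by simp)
            rw [loopA_step_go hK hA2 hA3, ← poolRunA_some hA3]
            apply poolRunA_perm
            rw [← List.append_assoc]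
            exact (hrA.symm).append_right [mA + m2A * 2]
      · rw [if_neg hK, loopA_step_stop hK]

-- ===== VERDICT (by name: the statement is the Claim_ definition above) =====
theorem solution_spec : Claim_equal_solution := by
  intro scoville K _ _
  unfold Spec_solution solution_alt
  have hA : solution scoville K = poolRunA scoville K 0 := rfl
  rw [hA]
  have hs : (PySem.List.sorted scoville (fun x => x)).Pairwise (· ≤ ·) :=
    PySem.List.sorted_pairwise scoville (fun x => x)
  rw [loopB_eq ((PySem.List.sorted scoville (fun x => x)).length + ([] : List Int).length)
      (PySem.List.sorted scoville (fun x => x)) [] K 0 rfl hs List.Pairwise.nil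
      (by intro c hc; simp at hc)]
  rw [List.append_nil]
  exact poolRunA_perm (PySem.List.sorted_perm scoville (fun x => x) false).symm K 0
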